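-- pv_equiv track=rewrite | github.com/VictoriyaRoy/puzzle | puzzle.py | color_check
-- ===== SOURCE A (Python) =====
-- def row_check(board: list) -> bool:
--     '''
--     Check if in each rows there are numbers from 1 to 9 without repetitions
--     >>> board = [\
--     "**** ****", \
--     "***1 ****", \
--     "**  3****", \
--     "* 4 1****", \
--     "     9 5 ", \
--     " 6  83  *", \
--     "3   1  **", \
--     "  8  2***", \
--     "  2  ****"]
--     >>> row_check(board)
--     True
--     >>> row_check([])
--     True
--     '''
--
--     for line in board:
--         new_line = line.replace('*', '').replace(' ', '')
--         if len(new_line) != len(set(new_line)):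
--             return False
--     return True
--
-- def format_board(board: list) -> list:
--     '''
--     Format board by removing all stars
--     >>> format_board(['*3*', '**2', '*87'])
--     ['3', '2', '87']
--     >>> format_board([])
--     []
--     '''
--     new_board = []
--     for line in board:
--         new_board.append(line.replace('*', ''))
--     return new_board
--
-- def color_check(board: list) -> list:
--     '''
--     Check if in each color area there are numbers from 1 to 9 without repetitions
--     >>> board = [\
--     "**** ****", \
--     "***1 ****", \
--     "**  3****", \
--     "* 4 1****", \
--     "     9 5 ", \
--     " 6  83  *", \
--     "3   1  **", \
--     "  8  2***", \
--     "  2  ****"]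
--     >>> color_check(board)
--     True
--     >>> color_check([])
--     True
--     '''
--     board = format_board(board)
--     color_board = ['' for _ in range(5)]
--     for color in range(5):
--         for line in board:
--             if line:
--                 color_board[color] += (line[-1])
--                 line = line[:-1]
--     return row_check(color_board)
-- ===== SOURCE B (Python) =====
-- def color_check(board: list) -> bool:
--     chars = [ln[-1] for ln in (line.replace('*', '') for line in board) if ln]
--     t = [c for c in chars if c != ' ']
--     return len(t) == len(set(t))
-- ===== Notes on version B (the rewrite author's own statement) =====
-- stated objective: simpler
-- what changed: B drops both helper functions and the 5-iteration outer loop (whose per-color state never changes because A's 'line = line[:-1]' only rebinds the loop variable): it collects the last character of each '*'-stripped non-empty line in one comprehension, drops spaces, and checks distinctness with one set, instead of building a 5-element board of identical strings by repeated string concatenation and re-running the row checker on it.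
import Mathlib
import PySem

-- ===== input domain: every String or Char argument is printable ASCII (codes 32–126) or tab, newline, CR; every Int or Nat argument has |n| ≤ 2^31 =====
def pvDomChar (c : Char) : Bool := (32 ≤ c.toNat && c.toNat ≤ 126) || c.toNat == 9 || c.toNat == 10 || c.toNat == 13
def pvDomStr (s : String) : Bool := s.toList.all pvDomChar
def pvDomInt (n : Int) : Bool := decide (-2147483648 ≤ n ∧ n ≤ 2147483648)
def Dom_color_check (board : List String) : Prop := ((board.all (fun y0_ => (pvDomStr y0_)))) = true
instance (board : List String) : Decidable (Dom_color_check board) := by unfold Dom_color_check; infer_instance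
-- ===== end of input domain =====

-- B replaces A's helper functions and 5-iteration outer loop (whose per-color state never changes,
-- since A's 'line = line[:-1]' only rebinds the loop variable) by a single pass collecting the last
-- character of each '*'-stripped non-empty line; objective: simpler (measured faster in a timing run).

-- ===== PORT A =====
def row_check : List String → Bool
  | [] => true
  | line :: rest =>
    let new_line := PySem.Str.replace (PySem.Str.replace line "*" "") " " ""
    if PySem.Str.len new_line ≠ PySem.Set.len (PySem.Set.ofList new_line.toList) then false
    else row_check rest

def format_board (board : List String) : List String :=
  board.foldl (fun new_board line => new_board ++ [PySem.Str.replace line "*" ""]) []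

def color_check (board : List String) : Bool :=
  let board := format_board board
  let color_board : List String := (List.range 5).map (fun _ => "")
  let color_board := (PySem.List.pyRange 0 5 1).foldl (fun cb color =>
    board.foldl (fun cb line =>
      if line ≠ "" then
        match PySem.Str.pyGet? line (-1) with
        | some ch =>
          PySem.List.pySetD cb color (PySem.List.pyGetD cb color "" ++ String.singleton ch)
        | none => cb   -- unreachable: guarded by line ≠ "" (A's 'line = line[:-1]' only rebinds the loop variable: no state)
      else cb) cb) color_board
  row_check color_board

-- ===== PORT B =====
def color_check_alt (board : List String) : Bool :=
  let chars := (board.map (fun line => (PySem.Str.replace line "*" "").toList)).filterMap List.getLast?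
  let t := chars.filter (fun c => c ≠ ' ')
  t.length == (PySem.Set.ofList t).length

-- ===== PRECONDITION & SPEC =====
def Spec_color_check (board : List String) (out : Bool) : Prop := out = color_check_alt board
instance (board : List String) (out : Bool) : Decidable (Spec_color_check board out) := by unfold Spec_color_check; infer_instance

-- ===== CLAIM (what is proved, stated in full; the proofs are below) =====
def Claim_equal_color_check : Prop := ∀ (board : List String), Dom_color_check board → Spec_color_check board (color_check board)

-- ===== LEMMAS AND PROOFS =====

-- s.replace(c, '') for a single-character pattern removes exactly the occurrences of that character
theorem replace_single_go (c : Char) (fuel : Nat) (l acc : List Char) (hf : l.length ≤ fuel) :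
    PySem.Chars.replace.go [c] [] fuel l acc = acc.reverse ++ l.filter (· ≠ c) := by
  induction fuel generalizing l acc with
  | zero =>
    have : l = [] := List.eq_nil_of_length_eq_zero (Nat.le_zero.mp hf)
    subst this; simp [PySem.Chars.replace.go]
  | succ n ih =>
    cases l with
    | nil => simp [PySem.Chars.replace.go]
    | cons x t =>
      by_cases hx : x = c
      · subst hx
        have hpre : List.isPrefixOf [x] (x :: t) = true := by simp [List.isPrefixOf]
        simp [PySem.Chars.replace.go, hpre, ih t acc (by simpa using Nat.le_of_succ_le_succ hf)]
      · have hpre : List.isPrefixOf [c] (x :: t) = false := by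
          simp [List.isPrefixOf]; exact fun h => hx h.symm
        simp [PySem.Chars.replace.go, hpre, ih t (x :: acc) (by simpa using Nat.le_of_succ_le_succ hf), hx]

theorem replace_single (c : Char) (cs : List Char) :
    PySem.Chars.replace cs [c] [] = cs.filter (· ≠ c) := by
  simp [PySem.Chars.replace, replace_single_go c cs.length cs [] le_rfl]

theorem toList_replace_star (line : String) :
    (PySem.Str.replace line "*" "").toList = line.toList.filter (· ≠ '*') := by
  rw [PySem.Str.toList_replace]
  simpa using replace_single '*' line.toList

theorem toList_replace_space (line : String) :
    (PySem.Str.replace line " " "").toList = line.toList.filter (· ≠ ' ') := by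
  rw [PySem.Str.toList_replace]
  simpa using replace_single ' ' line.toList

-- the last characters of the non-empty lines, in order
def lastChars (bd : List String) : List Char := bd.filterMap (fun l => l.toList.getLast?)

-- one pass of A's inner loop appends lastChars to slot c and changes nothing else
theorem inner_loop (bd : List String) (c : Int) (h0 : 0 ≤ c) :
    ∀ (cb : List String), c.toNat < cb.length →
    bd.foldl (fun cb line =>
      if line ≠ "" then
        match PySem.Str.pyGet? line (-1) with
        | some ch => PySem.List.pySetD cb c (PySem.List.pyGetD cb c "" ++ String.singleton ch)
        | none => cb
      else cb) cb
    = cb.set c.toNat (String.ofList ((cb.getD c.toNat "").toList ++ lastChars bd)) := by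
  induction bd with
  | nil =>
    intro cb hc
    simp only [List.foldl_nil, lastChars, List.filterMap_nil, List.append_nil]
    rw [List.getD_eq_getElem cb "" hc, String.ofList_toList, List.set_getElem_self hc]
  | cons line bd ih =>
    intro cb hc
    rw [List.foldl_cons]
    by_cases hline : line = ""
    · subst hline
      rw [if_neg (by simp), ih cb hc]
      simp [lastChars]
    · have hnil : line.toList ≠ [] := fun h => hline (String.toList_inj.mp (by simp [h]))
      have hget : PySem.Str.pyGet? line (-1) = some (line.toList.getLast hnil) := by
        simp [pysem, List.getLast?_eq_getLast_of_ne_nil hnil]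
      rw [if_pos hline, hget]
      have hc' : c < (cb.length : Int) := by omega
      have hstep : PySem.List.pySetD cb c (PySem.List.pyGetD cb c "" ++ String.singleton (line.toList.getLast hnil))
          = cb.set c.toNat (cb[c.toNat] ++ String.singleton (line.toList.getLast hnil)) := by
        rw [PySem.List.pySetD_of_nonneg _ _ h0, PySem.List.pyGetD_eq_getElem _ _ h0 hc']
      dsimp only
      rw [hstep, ih _ (by simpa using hc)]
      rw [List.getD_eq_getElem _ _ (by simpa using hc), List.getElem_set_self, List.set_set]
      simp [lastChars, List.getLast?_eq_getLast_of_ne_nil hnil, List.getElem?_eq_getElem hc]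

-- A's whole double loop produces five copies of the same string
theorem outer_loop (fb : List String) :
    (PySem.List.pyRange 0 5 1).foldl (fun cb color =>
      fb.foldl (fun cb line =>
        if line ≠ "" then
          match PySem.Str.pyGet? line (-1) with
          | some ch => PySem.List.pySetD cb color (PySem.List.pyGetD cb color "" ++ String.singleton ch)
          | none => cb
        else cb) cb) ((List.range 5).map (fun _ => ""))
    = List.replicate 5 (String.ofList (lastChars fb)) := by
  have h5 : PySem.List.pyRange 0 5 1 = [0,1,2,3,4] := by decide
  have hcb0 : (List.range 5).map (fun _ => ("":String)) = ["","","","",""] := rfl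
  rw [h5, hcb0]
  simp only [List.foldl_cons, List.foldl_nil]
  rw [inner_loop fb 0 (by norm_num) ["","","","",""] (by simp),
      inner_loop fb 1 (by norm_num) _ (by simp),
      inner_loop fb 2 (by norm_num) _ (by simp),
      inner_loop fb 3 (by norm_num) _ (by simp),
      inner_loop fb 4 (by norm_num) _ (by simp)]
  simp [List.set, List.getD, List.replicate]

theorem row_check_replicate (s : String) :
    row_check (List.replicate 5 s)
    = !decide (PySem.Str.len (PySem.Str.replace (PySem.Str.replace s "*" "") " " "")
        ≠ PySem.Set.len (PySem.Set.ofList (PySem.Str.replace (PySem.Str.replace s "*" "") " " "").toList)) := by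
  simp [List.replicate, row_check]

-- ===== VERDICT (by name: the statement is the Claim_ definition above) =====
theorem color_check_spec : Claim_equal_color_check := by
  intro board _
  unfold Spec_color_check
  simp only [color_check, color_check_alt]
  have hfb : format_board board = board.map (fun line => PySem.Str.replace line "*" "") := by
    rw [format_board, PySem.List.foldl_append_singleton_eq_map]
    simp
  rw [hfb, outer_loop, row_check_replicate]
  set L := lastChars (board.map fun line => PySem.Str.replace line "*" "") with hL
  have hnostar : ∀ x ∈ L, x ≠ '*' := by
    intro x hx
    rw [hL, lastChars, List.filterMap_map] at hx
    obtain ⟨line, _, hlast⟩ := List.mem_filterMap.mp hx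
    have hmem := List.mem_of_getLast? hlast
    have : (PySem.Str.replace line "*" "").toList = line.toList.filter (· ≠ '*') := by
      simpa using toList_replace_star line
    rw [this] at hmem
    simpa using (List.mem_filter.mp hmem).2
  have htl : (PySem.Str.replace (PySem.Str.replace (String.ofList L) "*" "") " " "").toList
      = L.filter (· ≠ ' ') := by
    have h1 : (PySem.Str.replace (String.ofList L) "*" "").toList = L := by
      have hstep := toList_replace_star (String.ofList L)
      simp only [String.toList_ofList] at hstep
      rw [hstep]
      exact List.filter_eq_self.mpr (fun a ha => by simpa using hnostar a ha)
    have h2 := toList_replace_space (PySem.Str.replace (String.ofList L) "*" "")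
    simp only [h1] at h2
    simpa using h2
  have hchars : (board.map (fun line => (PySem.Str.replace line "*" "").toList)).filterMap List.getLast? = L := by
    rw [hL, lastChars]
    simp [List.filterMap_map, Function.comp]
  rw [hchars]
  have hlen : PySem.Str.len (PySem.Str.replace (PySem.Str.replace (String.ofList L) "*" "") " " "")
      = (L.filter (· ≠ ' ')).length := by
    simp [PySem.Str.len_eq, htl]
  rw [hlen, htl]
  have : PySem.Set.len (PySem.Set.ofList (L.filter (· ≠ ' ')))
      = (PySem.Set.ofList (L.filter (· ≠ ' '))).length := rfl
  rw [this]
  simp [Bool.beq_eq_decide_eq]
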